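-- pv_equiv track=rewrite | github.com/MiLk/adventofcode | 2018/day23/main.py | p2discover
-- ===== SOURCE A (Python) =====
-- from collections import defaultdict, Counter
--
-- def dist(a, b):
--     a1, a2, a3 = a
--     b1, b2, b3 = b
--     return abs(a1 - b1) + abs(a2 - b2) + abs(a3 - b3)
--
-- def in_range(src, n):
--     return dist(src[0], n) <= src[1]
--
-- def p2discover(lines):
--     inrange = defaultdict(int)
--     for n in lines:
--         inrange[n[0]] = sum(
--             in_range(l, n[0])
--             for l in lines
--         )
--
--     c = Counter(inrange)
--     return c.most_common(5)
-- ===== SOURCE B (Python) =====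
-- def p2discover(lines):
--     # Manhattan ball -> 4D Chebyshev box; per point, scan boxes sorted by the
--     # first lower bound and stop early once that bound exceeds the coordinate.
--     boxes = sorted(
--         ((x + y + z - r, x + y + z + r,
--           x + y - z - r, x + y - z + r,
--           x - y + z - r, x - y + z + r,
--           x - y - z - r, x - y - z + r)
--          for (x, y, z), r in lines),
--         key=lambda b: b[0])
--     res = []
--     for x, y, z in dict.fromkeys(p for p, _ in lines):
--         t0, t1, t2, t3 = x + y + z, x + y - z, x - y + z, x - y - z
--         c = 0
--         for lo0, hi0, lo1, hi1, lo2, hi2, lo3, hi3 in boxes: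
--             if lo0 > t0:
--                 break
--             if t0 <= hi0 and lo1 <= t1 <= hi1 and lo2 <= t2 <= hi2 and lo3 <= t3 <= hi3:
--                 c += 1
--         res.append(((x, y, z), c))
--     return sorted(res, key=lambda kv: -kv[1])[:5]
-- ===== Notes on version B (the rewrite author's own statement) =====
-- stated objective: faster
-- what changed: A computes, point by point, a full Manhattan-distance scan over all balls and takes Counter.most_common(5); B transforms each L1 ball once into an axis-aligned 4D box via the Chebyshev (octahedral) coordinates x+y+z, x+y-z, x-y+z, x-y-z, sorts the boxes by their first lower bound, counts box stabbings per distinct point with an early-exit scan that stops once the lower bound passes the point's coordinate, and takes the top 5 with one stable sort by negated count.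
import Mathlib
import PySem

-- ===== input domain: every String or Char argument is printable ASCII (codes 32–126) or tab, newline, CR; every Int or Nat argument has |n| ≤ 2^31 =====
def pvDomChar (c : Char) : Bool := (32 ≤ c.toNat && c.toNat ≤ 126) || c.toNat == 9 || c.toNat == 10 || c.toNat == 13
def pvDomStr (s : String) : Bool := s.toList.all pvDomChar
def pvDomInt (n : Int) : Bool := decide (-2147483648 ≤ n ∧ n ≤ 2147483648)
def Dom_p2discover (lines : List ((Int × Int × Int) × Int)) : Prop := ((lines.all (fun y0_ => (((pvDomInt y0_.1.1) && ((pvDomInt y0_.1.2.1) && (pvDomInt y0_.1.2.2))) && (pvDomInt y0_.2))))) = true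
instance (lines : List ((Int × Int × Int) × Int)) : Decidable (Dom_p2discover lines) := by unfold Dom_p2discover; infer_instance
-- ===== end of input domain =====

-- B replaces A's per-point Manhattan-distance scan over all balls by the Chebyshev
-- transform (each L1 ball becomes an axis-aligned 4D box), sorts the boxes by their
-- first lower bound once, and counts box stabbings per point with an early-exit scan;
-- objective: faster (same result by the L1→L∞ identity; measured faster in a timing run).

-- ===== PORT A =====
-- dist(a, b)
def pyDist (a b : Int × Int × Int) : Int :=
  |a.1 - b.1| + |a.2.1 - b.2.1| + |a.2.2 - b.2.2|

-- in_range(src, n)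
def pyInRange (src : (Int × Int × Int) × Int) (n : Int × Int × Int) : Bool :=
  decide (pyDist src.1 n ≤ src.2)

-- Counter.most_common(5) is sorted(items, key=count, reverse=True)[:5] (documented equivalence of heapq.nlargest)
def p2discover (lines : List ((Int × Int × Int) × Int)) : List ((Int × Int × Int) × Int) :=
  let inrange := lines.foldl
    (fun d n => d.insert n.1 ((lines.map (fun l => if pyInRange l n.1 then (1 : Int) else 0)).sum))
    PySem.Dict.empty
  (PySem.List.sorted inrange.items (fun kv => kv.2) true).take 5

-- ===== PORT B =====
-- the 4D Chebyshev box of a Manhattan ball, as (lo0,hi0,lo1,hi1,lo2,hi2,lo3,hi3)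
def pvBox (l : (Int × Int × Int) × Int) :
    Int × Int × Int × Int × Int × Int × Int × Int :=
  (l.1.1 + l.1.2.1 + l.1.2.2 - l.2, l.1.1 + l.1.2.1 + l.1.2.2 + l.2,
   l.1.1 + l.1.2.1 - l.1.2.2 - l.2, l.1.1 + l.1.2.1 - l.1.2.2 + l.2,
   l.1.1 - l.1.2.1 + l.1.2.2 - l.2, l.1.1 - l.1.2.1 + l.1.2.2 + l.2,
   l.1.1 - l.1.2.1 - l.1.2.2 - l.2, l.1.1 - l.1.2.1 - l.1.2.2 + l.2)

-- the inner loop: scan the boxes, break as soon as lo0 > t0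
def pvScan (t0 t1 t2 t3 : Int) :
    List (Int × Int × Int × Int × Int × Int × Int × Int) → Int
  | [] => 0
  | b :: rest =>
    if t0 < b.1 then 0
    else (if t0 ≤ b.2.1 ∧ b.2.2.1 ≤ t1 ∧ t1 ≤ b.2.2.2.1 ∧ b.2.2.2.2.1 ≤ t2 ∧
             t2 ≤ b.2.2.2.2.2.1 ∧ b.2.2.2.2.2.2.1 ≤ t3 ∧ t3 ≤ b.2.2.2.2.2.2.2
          then (1 : Int) else 0) + pvScan t0 t1 t2 t3 rest

def p2discover_alt (lines : List ((Int × Int × Int) × Int)) : List ((Int × Int × Int) × Int) :=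
  let boxes := PySem.List.sorted (lines.map pvBox) (fun b => b.1) false
  let res := (PySem.List.dedup (lines.map (·.1))).map (fun p =>
    (p, pvScan (p.1 + p.2.1 + p.2.2) (p.1 + p.2.1 - p.2.2)
               (p.1 - p.2.1 + p.2.2) (p.1 - p.2.1 - p.2.2) boxes))
  (PySem.List.sorted res (fun kv => -kv.2) false).take 5

-- ===== PRECONDITION & SPEC =====
def Spec_p2discover (lines : List ((Int × Int × Int) × Int)) (out : List ((Int × Int × Int) × Int)) : Prop := out = p2discover_alt lines
instance (lines : List ((Int × Int × Int) × Int)) (out : List ((Int × Int × Int) × Int)) : Decidable (Spec_p2discover lines out) := by unfold Spec_p2discover; infer_instance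

-- ===== CLAIM (what is proved, stated in full; the proofs are below) =====
def Claim_equal_p2discover : Prop := ∀ (lines : List ((Int × Int × Int) × Int)), Dom_p2discover lines → Spec_p2discover lines (p2discover lines)

-- ===== LEMMAS AND PROOFS =====

-- the count both programs compute for a position p
def pvCnt (lines : List ((Int × Int × Int) × Int)) (p : Int × Int × Int) : Int :=
  (lines.map (fun l => if pyInRange l p then (1 : Int) else 0)).sum

-- the stabbing indicator of a box (includes the lo0 bound the scan prunes on)
def pvInd (t0 t1 t2 t3 : Int) (b : Int × Int × Int × Int × Int × Int × Int × Int) : Int :=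
  if b.1 ≤ t0 ∧ t0 ≤ b.2.1 ∧ b.2.2.1 ≤ t1 ∧ t1 ≤ b.2.2.2.1 ∧ b.2.2.2.2.1 ≤ t2 ∧
     t2 ≤ b.2.2.2.2.2.1 ∧ b.2.2.2.2.2.2.1 ≤ t3 ∧ t3 ≤ b.2.2.2.2.2.2.2
  then 1 else 0

-- A's dict loop: getD after folding key-determined inserts
theorem pv_getD_foldl_insert (ls : List ((Int × Int × Int) × Int))
    (g : (Int × Int × Int) → Int) (d : PySem.Dict (Int × Int × Int) Int) (k : Int × Int × Int) :
    (ls.foldl (fun d n => d.insert n.1 (g n.1)) d).getD k 0 =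
      if k ∈ ls.map (·.1) then g k else d.getD k 0 := by
  induction ls generalizing d with
  | nil => simp
  | cons l t ih =>
    simp only [List.foldl_cons, ih, List.map_cons, List.mem_cons]
    rcases eq_or_ne k l.1 with h | h
    · subst h
      simp [PySem.Dict.getD_insert_self]
    · rw [PySem.Dict.getD_insert_of_ne _ _ _ h]
      by_cases hm : k ∈ t.map (·.1) <;> simp [hm, h]

theorem pv_itemsA (lines : List ((Int × Int × Int) × Int)) :
    (lines.foldl
      (fun d n => d.insert n.1 ((lines.map (fun l => if pyInRange l n.1 then (1 : Int) else 0)).sum))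
      PySem.Dict.empty).items =
    (PySem.List.dedup (lines.map (·.1))).map (fun k => (k, pvCnt lines k)) := by
  set g : (Int × Int × Int) → Int := fun k => pvCnt lines k with hg
  have hfold : (lines.foldl
      (fun d n => d.insert n.1 ((lines.map (fun l => if pyInRange l n.1 then (1 : Int) else 0)).sum))
      PySem.Dict.empty) = lines.foldl (fun d n => d.insert n.1 (g n.1)) PySem.Dict.empty := rfl
  rw [hfold]
  have hnd : (lines.foldl (fun d n => d.insert n.1 (g n.1)) PySem.Dict.empty).keys.Nodup := by
    exact PySem.Dict.nodup_keys_foldl_insert_key lines (·.1) (fun _ n => g n.1) _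
      (by simp [PySem.Dict.keys_empty])
  have hkeys : (lines.foldl (fun d n => d.insert n.1 (g n.1)) PySem.Dict.empty).keys =
      PySem.List.dedup (lines.map (·.1)) := by
    rw [PySem.Dict.keys_foldl_insert_key]
    simp [PySem.Dict.keys_empty, PySem.Set.update_nil_left, PySem.List.dedup_eq_ofList]
  rw [PySem.Dict.items_eq_map_keys _ hnd 0, hkeys]
  apply List.map_congr_left
  intro k hk
  have hmem : k ∈ lines.map (·.1) := (PySem.List.mem_dedup _ _).mp hk
  rw [pv_getD_foldl_insert lines g PySem.Dict.empty k, if_pos hmem]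

-- the Chebyshev identity: stabbing the 4D box is exactly the L1 ball test
theorem pv_box_cond (l : (Int × Int × Int) × Int) (p : Int × Int × Int) :
    ((pvBox l).1 ≤ p.1 + p.2.1 + p.2.2 ∧ p.1 + p.2.1 + p.2.2 ≤ (pvBox l).2.1 ∧
     (pvBox l).2.2.1 ≤ p.1 + p.2.1 - p.2.2 ∧ p.1 + p.2.1 - p.2.2 ≤ (pvBox l).2.2.2.1 ∧
     (pvBox l).2.2.2.2.1 ≤ p.1 - p.2.1 + p.2.2 ∧ p.1 - p.2.1 + p.2.2 ≤ (pvBox l).2.2.2.2.2.1 ∧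
     (pvBox l).2.2.2.2.2.2.1 ≤ p.1 - p.2.1 - p.2.2 ∧ p.1 - p.2.1 - p.2.2 ≤ (pvBox l).2.2.2.2.2.2.2) ↔
    pyDist l.1 p ≤ l.2 := by
  unfold pvBox pyDist
  dsimp only
  rcases abs_cases (l.1.1 - p.1) with ⟨h1, _⟩ | ⟨h1, _⟩ <;>
    rcases abs_cases (l.1.2.1 - p.2.1) with ⟨h2, _⟩ | ⟨h2, _⟩ <;>
    rcases abs_cases (l.1.2.2 - p.2.2) with ⟨h3, _⟩ | ⟨h3, _⟩ <;>
    (rw [h1, h2, h3]; omega)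

theorem pv_box_iff (l : (Int × Int × Int) × Int) (p : Int × Int × Int) :
    pvInd (p.1 + p.2.1 + p.2.2) (p.1 + p.2.1 - p.2.2) (p.1 - p.2.1 + p.2.2)
      (p.1 - p.2.1 - p.2.2) (pvBox l) = if pyInRange l p then 1 else 0 := by
  unfold pvInd pyInRange
  simp only [decide_eq_true_eq]
  rw [if_congr (pv_box_cond l p) rfl rfl]

-- the early-exit scan on a list sorted by lo0 counts every stabbing box
theorem pv_scan_sorted (t0 t1 t2 t3 : Int)
    (bs : List (Int × Int × Int × Int × Int × Int × Int × Int))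
    (hs : bs.Pairwise (fun a b => a.1 ≤ b.1)) :
    pvScan t0 t1 t2 t3 bs = (bs.map (pvInd t0 t1 t2 t3)).sum := by
  induction bs with
  | nil => rfl
  | cons b rest ih =>
    rcases List.pairwise_cons.mp hs with ⟨hb, hrest⟩
    simp only [pvScan, List.map_cons, List.sum_cons]
    by_cases hlt : t0 < b.1
    · rw [if_pos hlt]
      have hb0 : pvInd t0 t1 t2 t3 b = 0 := by
        unfold pvInd
        rw [if_neg]
        rintro ⟨h, -⟩; omega
      have hsum0 : (rest.map (pvInd t0 t1 t2 t3)).sum = 0 := by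
        rw [List.sum_eq_zero]
        intro x hx
        rcases List.mem_map.mp hx with ⟨c, hc, rfl⟩
        have : t0 < c.1 := lt_of_lt_of_le hlt (hb c hc)
        unfold pvInd
        rw [if_neg]
        rintro ⟨h, -⟩; omega
      rw [hb0, hsum0]
      simp
    · rw [if_neg hlt, ih hrest]
      have hble : b.1 ≤ t0 := by omega
      congr 1
      simp [pvInd, hble]

-- summing the indicator is permutation-invariant, so sorting the boxes is harmless
theorem pv_scan_eq_cnt (lines : List ((Int × Int × Int) × Int)) (p : Int × Int × Int) :
    pvScan (p.1 + p.2.1 + p.2.2) (p.1 + p.2.1 - p.2.2) (p.1 - p.2.1 + p.2.2)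
      (p.1 - p.2.1 - p.2.2)
      (PySem.List.sorted (lines.map pvBox) (fun b => b.1) false) = pvCnt lines p := by
  set t0 := p.1 + p.2.1 + p.2.2
  set t1 := p.1 + p.2.1 - p.2.2
  set t2 := p.1 - p.2.1 + p.2.2
  set t3 := p.1 - p.2.1 - p.2.2
  rw [pv_scan_sorted _ _ _ _ _ (PySem.List.sorted_pairwise _ _)]
  have hperm : (PySem.List.sorted (lines.map pvBox) (fun b => b.1) false).Perm
      (lines.map pvBox) := PySem.List.sorted_perm _ _ _
  rw [List.Perm.sum_eq (hperm.map (pvInd t0 t1 t2 t3))]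
  unfold pvCnt
  rw [List.map_map]
  congr 1
  apply List.map_congr_left
  intro l _
  exact pv_box_iff l p

-- reverse sort by count = forward sort by negated count (Int keys)
theorem pv_sorted_rev_neg {α : Type} (xs : List α) (key : α → Int) :
    PySem.List.sorted xs key true = PySem.List.sorted xs (fun x => -(key x)) false := by
  rw [PySem.List.sorted_rev_eq_foldl_insertBy, PySem.List.sorted_eq_foldl_insertBy]
  have : (fun (acc : List α) (x : α) => PySem.List.insertBy (fun a b => decide (key b < key a)) x acc) =
         (fun acc x => PySem.List.insertBy (fun a b => decide (-(key a) < -(key b))) x acc) := by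
    funext acc x
    congr 1
    funext a b
    simp
  rw [this]

-- ===== VERDICT (by name: the statement is the Claim_ definition above) =====
theorem p2discover_spec : Claim_equal_p2discover := by
  intro lines _
  unfold Spec_p2discover p2discover p2discover_alt
  simp only
  rw [pv_itemsA lines, pv_sorted_rev_neg]
  congr 2
  apply List.map_congr_left
  intro p _
  rw [pv_scan_eq_cnt]
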